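-- pv_equiv track=rewrite | github.com/OpenInterpreter/open-interpreter | venv/lib/python3.10/site-packages/astor/source_repr.py | delimiter_groups
-- ===== SOURCE A (Python) =====
-- begin_delim = set('([{')
--
-- end_delim = set(')]}')
--
-- def delimiter_groups(line, begin_delim=begin_delim,
--                      end_delim=end_delim):
--     """Split a line into alternating groups.
--        The first group cannot have a line feed inserted,
--        the next one can, etc.
--     """
--     text = []
--     line = iter(line)
--     while True:
--         # First build and yield an unsplittable group
--         for item in line:
--             text.append(item)
--             if item in begin_delim:
--                 break
--         if not text:
--             break
--         yield text
--
--         # Now build and yield a splittable group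
--         level = 0
--         text = []
--         for item in line:
--             if item in begin_delim:
--                 level += 1
--             elif item in end_delim:
--                 level -= 1
--                 if level < 0:
--                     yield text
--                     text = [item]
--                     break
--             text.append(item)
--         else:
--             assert not text, text
--             break
-- ===== SOURCE B (Python) =====
-- begin_delim = set('([{')
--
-- end_delim = set(')]}')
--
-- def delimiter_groups(line, begin_delim=begin_delim,
--                      end_delim=end_delim):
--     """Split a line into alternating groups (single-pass state machine)."""
--     group = []
--     splitting = False
--     level = 0
--     for item in line:
--         if splitting:
--             if item in begin_delim:
--                 level += 1
--                 group.append(item)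
--             elif item in end_delim:
--                 if level == 0:
--                     yield group
--                     group = [item]
--                     splitting = False
--                 else:
--                     level -= 1
--                     group.append(item)
--             else:
--                 group.append(item)
--         else:
--             group.append(item)
--             if item in begin_delim:
--                 yield group
--                 group = []
--                 splitting = True
--                 level = 0
--     if splitting:
--         assert not group, group
--     elif group:
--         yield group
-- ===== Notes on version B (the rewrite author's own statement) =====
-- stated objective: simpler
-- what changed: Replaced the generator's outer while-True with two nested for-loops sharing one iterator by a single pass over the characters with an explicit two-phase state machine (phase flag, nesting level, current group).
import Mathlib
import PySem

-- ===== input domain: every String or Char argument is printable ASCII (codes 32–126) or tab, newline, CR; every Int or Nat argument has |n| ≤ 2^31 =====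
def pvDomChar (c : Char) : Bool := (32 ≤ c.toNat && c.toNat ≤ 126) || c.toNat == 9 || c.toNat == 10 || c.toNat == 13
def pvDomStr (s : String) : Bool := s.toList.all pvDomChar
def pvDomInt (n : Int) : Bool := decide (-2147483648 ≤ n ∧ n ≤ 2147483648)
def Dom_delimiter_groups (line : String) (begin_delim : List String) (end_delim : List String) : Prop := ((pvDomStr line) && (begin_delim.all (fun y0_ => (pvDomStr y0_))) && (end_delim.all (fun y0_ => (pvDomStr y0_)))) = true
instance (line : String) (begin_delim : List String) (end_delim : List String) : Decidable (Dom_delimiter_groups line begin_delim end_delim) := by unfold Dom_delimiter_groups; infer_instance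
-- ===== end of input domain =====

-- B replaces the generator's nested while/for loops sharing one iterator by a single
-- pass with an explicit two-phase state machine (phase flag, level counter, group).

-- ===== PORT A =====
-- iterating a Python str yields 1-character strings
def chr1 (c : Char) : String := String.ofList [c]

-- A's first inner for-loop: build an unsplittable group until a begin delimiter;
-- returns (text, remaining iterator)
def dgUnsplit (bd : List String) (rest : List Char) (text : List String) :
    List String × List Char :=
  match rest with
  | [] => (text, [])
  | c :: cs =>
    let text := text ++ [chr1 c]
    if chr1 c ∈ bd then (text, cs) else dgUnsplit bd cs text

-- A's second inner for-loop: build a splittable group; Sum.inl (yielded text, seed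
-- of the next group, remaining iterator) on a surplus close, Sum.inr leftover text
-- when the iterator is exhausted (Python asserts leftover = [] there)
def dgSplit (bd ed : List String) (rest : List Char) (level : Int) (text : List String) :
    (List String × List String × List Char) ⊕ List String :=
  match rest with
  | [] => Sum.inr text
  | c :: cs =>
    let s := chr1 c
    if s ∈ bd then dgSplit bd ed cs (level + 1) (text ++ [s])
    else if s ∈ ed then
      if level - 1 < 0 then Sum.inl (text, [s], cs)
      else dgSplit bd ed cs (level - 1) (text ++ [s])
    else dgSplit bd ed cs level (text ++ [s])

theorem dgUnsplit_len (bd : List String) (rest : List Char) (text : List String) :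
    (dgUnsplit bd rest text).2.length ≤ rest.length := by
  induction rest generalizing text with
  | nil => simp [dgUnsplit]
  | cons c cs ih =>
    simp only [dgUnsplit]
    split
    · simp
    · exact (ih _).trans (by simp)

theorem dgSplit_len (bd ed : List String) (rest : List Char) (level : Int) (text : List String)
    (yt seed : List String) (rest' : List Char)
    (h : dgSplit bd ed rest level text = Sum.inl (yt, seed, rest')) :
    rest'.length < rest.length := by
  induction rest generalizing level text with
  | nil => simp [dgSplit] at h
  | cons c cs ih =>
    simp only [dgSplit] at h
    split at h
    · exact (ih _ _ h).trans (by simp)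
    · split at h
      · split at h
        · cases h; simp
        · exact (ih _ _ h).trans (by simp)
      · exact (ih _ _ h).trans (by simp)

-- A's outer while-True loop; acc collects the yields
def dgMain (bd ed : List String) (rest : List Char) (seed : List String)
    (acc : List (List String)) : List (List String) :=
  let p := dgUnsplit bd rest seed
  if p.1 = [] then acc
  else
    match hs : dgSplit bd ed p.2 0 [] with
    | Sum.inr _ => acc ++ [p.1]
    | Sum.inl (yt, seed', rest') => dgMain bd ed rest' seed' (acc ++ [p.1, yt])
termination_by rest.length
decreasing_by
  exact lt_of_lt_of_le (dgSplit_len bd ed p.2 0 [] yt seed' rest' hs)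
    (dgUnsplit_len bd rest seed)

def delimiter_groups (line : String) (begin_delim : List String) (end_delim : List String) : List (List String) :=
  dgMain begin_delim end_delim line.toList [] []

-- ===== PORT B =====
-- one step of B's state machine; state = (splitting, level, group, yields so far)
def dgbStep (bd ed : List String) (st : Bool × Int × List String × List (List String))
    (c : Char) : Bool × Int × List String × List (List String) :=
  let (splitting, level, group, acc) := st
  let s := chr1 c
  if splitting then
    if s ∈ bd then (true, level + 1, group ++ [s], acc)
    else if s ∈ ed then
      if level = 0 then (false, 0, [s], acc ++ [group])
      else (true, level - 1, group ++ [s], acc)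
    else (true, level, group ++ [s], acc)
  else
    let group := group ++ [s]
    if s ∈ bd then (true, 0, [], acc ++ [group]) else (false, level, group, acc)

-- B's finalisation after the loop
def dgbFin (st : Bool × Int × List String × List (List String)) : List (List String) :=
  let (splitting, _, group, acc) := st
  if splitting then acc
  else if group = [] then acc else acc ++ [group]

def delimiter_groups_alt (line : String) (begin_delim : List String) (end_delim : List String) : List (List String) :=
  dgbFin (line.toList.foldl (dgbStep begin_delim end_delim) (false, 0, [], []))

-- ===== PRECONDITION & SPEC =====
-- nesting depth of the scan: +1 on a begin delimiter, -1 (clamped at 0) on an end one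
def dgDepth (bd ed : List String) (cs : List Char) (d : Nat) : Nat :=
  match cs with
  | [] => d
  | c :: cs =>
    dgDepth bd ed cs (if chr1 c ∈ bd then d + 1 else if chr1 c ∈ ed then d - 1 else d)

-- Pre_ excludes exactly the inputs on which the Python generator raises
-- AssertionError (the line ends inside an unclosed splittable group that already
-- holds at least one character): no raise iff the final depth is 0, or the very
-- last character is the begin delimiter opening that group.  The ports happen to
-- agree even there (both return the groups yielded before the raise), so the
-- equivalence proof does not use Pre_; it only delimits where Python A returns.
def Pre_delimiter_groups (line : String) (begin_delim : List String) (end_delim : List String) : Prop :=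
  dgDepth begin_delim end_delim line.toList 0 = 0 ∨
  (line.toList ≠ [] ∧ dgDepth begin_delim end_delim line.toList.dropLast 0 = 0 ∧
    chr1 (line.toList.getLast!) ∈ begin_delim)
instance (line : String) (begin_delim : List String) (end_delim : List String) : Decidable (Pre_delimiter_groups line begin_delim end_delim) := by unfold Pre_delimiter_groups; infer_instance

def pvWitness_delimiter_groups : String × List String × List String :=
  ("foo(a, [b]) = {c}", ["(", "[", "{"], [")", "]", "}"])

def Spec_delimiter_groups (line : String) (begin_delim : List String) (end_delim : List String) (out : List (List String)) : Prop := out = delimiter_groups_alt line begin_delim end_delim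
instance (line : String) (begin_delim : List String) (end_delim : List String) (out : List (List String)) : Decidable (Spec_delimiter_groups line begin_delim end_delim out) := by unfold Spec_delimiter_groups; infer_instance

-- ===== CLAIM (what is proved, stated in full; the proofs are below) =====
def Claim_equal_delimiter_groups : Prop := ∀ (line : String) (begin_delim : List String) (end_delim : List String), Dom_delimiter_groups line begin_delim end_delim → Pre_delimiter_groups line begin_delim end_delim → Spec_delimiter_groups line begin_delim end_delim (delimiter_groups line begin_delim end_delim)

-- ===== LEMMAS AND PROOFS =====

-- non-dependent unfolding equation for dgMain
theorem dgMain_eq (bd ed : List String) (rest : List Char) (seed : List String)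
    (acc : List (List String)) :
    dgMain bd ed rest seed acc =
      (if (dgUnsplit bd rest seed).1 = [] then acc
       else
         match dgSplit bd ed (dgUnsplit bd rest seed).2 0 [] with
         | Sum.inr _ => acc ++ [(dgUnsplit bd rest seed).1]
         | Sum.inl (yt, seed', rest') =>
             dgMain bd ed rest' seed' (acc ++ [(dgUnsplit bd rest seed).1, yt])) := by
  rw [dgMain]
  split
  · rfl
  · split <;> rename_i heq <;> rw [heq]

-- the two phase invariants, by strong induction on the remaining input:
-- from a non-splitting state B's fold computes A's outer loop, and from a
-- splitting state (level ≥ 0) it computes A's splittable-group loop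
theorem dg_phases (bd ed : List String) (n : Nat) :
    ∀ cs : List Char, cs.length ≤ n →
      (∀ (lvl : Int) (group : List String) (acc : List (List String)),
        dgbFin (cs.foldl (dgbStep bd ed) (false, lvl, group, acc)) =
          dgMain bd ed cs group acc) ∧
      (∀ (level : Int) (group : List String) (acc : List (List String)), 0 ≤ level →
        dgbFin (cs.foldl (dgbStep bd ed) (true, level, group, acc)) =
          (match dgSplit bd ed cs level group with
           | Sum.inr _ => acc
           | Sum.inl (yt, seed, rest) => dgMain bd ed rest seed (acc ++ [yt]))) := by
  induction n with
  | zero =>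
    intro cs hcs
    have : cs = [] := List.eq_nil_of_length_eq_zero (Nat.le_zero.mp hcs)
    subst this
    constructor
    · intro lvl group acc
      rw [dgMain_eq]
      simp only [dgUnsplit, dgSplit]
      simp [dgbFin]
    · intro level group acc _
      simp [dgbFin, dgSplit]
  | succ n ih =>
    intro cs hcs
    match cs with
    | [] => exact ih [] (by simp)
    | c :: cs =>
      have hcs' : cs.length ≤ n := by simpa using hcs
      constructor
      · intro lvl group acc
        rw [dgMain_eq]
        simp only [List.foldl_cons, dgbStep, dgUnsplit, Bool.false_eq_true, if_false]
        by_cases hb : chr1 c ∈ bd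
        · simp only [hb, if_true]
          rw [(ih cs hcs').2 0 [] (acc ++ [group ++ [chr1 c]]) le_rfl]
          have hne : ¬(group ++ [chr1 c] = []) := by simp
          simp only [hne, if_false]
          split <;> simp
        · simp only [hb, if_false]
          rw [(ih cs hcs').1 lvl (group ++ [chr1 c]) acc]
          rw [dgMain_eq]
      · intro level group acc hlev
        simp only [List.foldl_cons, dgbStep, dgSplit]
        by_cases hb : chr1 c ∈ bd
        · simp only [hb, if_true]
          exact (ih cs hcs').2 (level + 1) (group ++ [chr1 c]) acc (by omega)
        · by_cases he : chr1 c ∈ ed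
          · simp only [hb, he, if_true, if_false]
            by_cases h0 : level = 0
            · subst h0
              simp only [show ((0:Int) - 1 < 0) = True by simp, if_true]
              exact (ih cs hcs').1 0 [chr1 c] (acc ++ [group])
            · have : ¬(level - 1 < 0) := by omega
              simp only [if_neg h0, if_neg this]
              exact (ih cs hcs').2 (level - 1) (group ++ [chr1 c]) acc (by omega)
          · simp only [hb, he, if_false]
            exact (ih cs hcs').2 level (group ++ [chr1 c]) acc hlev

-- the ports agree on every input (even where the Python raises)
theorem dg_total_eq (line : String) (bd ed : List String) :
    delimiter_groups line bd ed = delimiter_groups_alt line bd ed := by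
  unfold delimiter_groups delimiter_groups_alt
  exact ((dg_phases bd ed line.toList.length line.toList le_rfl).1 0 [] []).symm

-- ===== VERDICT (by name: the statement is the Claim_ definition above) =====
theorem delimiter_groups_spec : Claim_equal_delimiter_groups := by
  intro line bd ed _ _
  exact (dg_total_eq line bd ed).symm ▸ rfl
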